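-- pv_equiv track=rewrite | github.com/rps-rajput/Preftestpro | utils/report_generator.py | _get_shortened_endpoint
-- ===== SOURCE A (Python) =====
-- def _get_shortened_endpoint(endpoint):
--     """Returns a shortened version of the endpoint for display in charts"""
--     # Find the last segment of the URL after /, = or other separators
--     separators = ['/', '=', '?', '&', '-', '_']
--     for sep in separators:
--         if sep in endpoint:
--             parts = endpoint.split(sep)
--             endpoint = parts[-1]  # Take the last part
--     # Limit to 15 characters max
--     if len(endpoint) > 15:
--         endpoint = endpoint[:12] + "..."
--     return endpoint
-- ===== SOURCE B (Python) =====
-- def _get_shortened_endpoint(endpoint):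
--     """Returns a shortened version of the endpoint for display in charts"""
--     # The last segment is everything after the rightmost separator:
--     # scan backwards once instead of splitting repeatedly.
--     separators = {'/', '=', '?', '&', '-', '_'}
--     i = len(endpoint) - 1
--     while i >= 0 and endpoint[i] not in separators:
--         i -= 1
--     endpoint = endpoint[i + 1:]
--     # Limit to 15 characters max
--     if len(endpoint) > 15:
--         endpoint = endpoint[:12] + "..."
--     return endpoint
-- ===== Notes on version B (the rewrite author's own statement) =====
-- stated objective: simpler
-- what changed: Replaces the six successive membership-test-and-split passes with a single backward character scan that takes the maximal separator-free suffix (everything after the rightmost separator), then applies the same truncation.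
import Mathlib
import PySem

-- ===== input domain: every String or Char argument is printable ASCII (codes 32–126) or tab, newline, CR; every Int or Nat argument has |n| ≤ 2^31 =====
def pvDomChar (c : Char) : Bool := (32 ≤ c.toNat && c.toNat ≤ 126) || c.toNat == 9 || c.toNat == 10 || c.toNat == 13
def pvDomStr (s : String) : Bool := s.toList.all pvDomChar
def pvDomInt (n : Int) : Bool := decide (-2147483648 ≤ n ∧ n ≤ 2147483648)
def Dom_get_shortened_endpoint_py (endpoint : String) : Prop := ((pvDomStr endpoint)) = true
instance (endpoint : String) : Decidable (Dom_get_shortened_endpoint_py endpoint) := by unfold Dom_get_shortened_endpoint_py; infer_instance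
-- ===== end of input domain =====

-- B replaces A's six membership-test-and-split passes with one backward scan for the rightmost separator (simpler, single pass).

-- ===== PORT A =====
-- separators = ['/', '=', '?', '&', '-', '_']
def pvSeparators : List (List Char) := [['/'], ['='], ['?'], ['&'], ['-'], ['_']]

def get_shortened_endpoint_py (endpoint : String) : String :=
  -- for sep in separators: if sep in endpoint: endpoint = endpoint.split(sep)[-1]
  let ep := pvSeparators.foldl (fun ep sep =>
      if PySem.Chars.isIn sep ep then
        -- parts[-1]; split with a nonempty separator never returns [], so the default is unreachable
        (PySem.List.pyGet? (PySem.Chars.splitOn ep sep) (-1)).getD []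
      else ep) endpoint.toList
  -- if len(endpoint) > 15: endpoint = endpoint[:12] + "..."
  let ep2 := if PySem.Chars.len ep > 15 then PySem.Chars.slice ep none (some 12) ++ "...".toList else ep
  String.ofList ep2

-- ===== PORT B =====
def pvSepSet : List Char := PySem.Set.ofList ['/', '=', '?', '&', '-', '_']

-- the backward while-loop of B: walk from the end (the reversed list), collecting
-- the suffix in acc until a separator is hit
def pvScan (rev : List Char) (acc : List Char) : List Char :=
  match rev with
  | [] => acc
  | c :: rest => if pvSepSet.contains c then acc else pvScan rest (c :: acc)

def get_shortened_endpoint_py_alt (endpoint : String) : String :=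
  let tail := pvScan endpoint.toList.reverse []
  let tail2 := if tail.length > 15 then tail.take 12 ++ "...".toList else tail
  String.ofList tail2

-- ===== PRECONDITION & SPEC =====
def Spec_get_shortened_endpoint_py (endpoint : String) (out : String) : Prop := out = get_shortened_endpoint_py_alt endpoint
instance (endpoint : String) (out : String) : Decidable (Spec_get_shortened_endpoint_py endpoint out) := by unfold Spec_get_shortened_endpoint_py; infer_instance

-- ===== CLAIM (what is proved, stated in full; the proofs are below) =====
def Claim_equal_get_shortened_endpoint_py : Prop := ∀ (endpoint : String), Dom_get_shortened_endpoint_py endpoint → Spec_get_shortened_endpoint_py endpoint (get_shortened_endpoint_py endpoint)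

-- ===== LEMMAS AND PROOFS =====

-- the maximal c-free suffix of l (what one split-and-take-last pass of A computes)
def pvTailseg (c : Char) (l : List Char) : List Char :=
  (l.reverse.takeWhile (fun a => a != c)).reverse

theorem pv_singleton_infix_iff (c : Char) (l : List Char) : [c] <:+: l ↔ c ∈ l := by
  constructor
  · intro h; exact h.mem (List.mem_singleton_self c)
  · intro h; obtain ⟨s, t, rfl⟩ := List.append_of_mem h
    exact ⟨s, t, by simp⟩

theorem pv_takeWhile_all {p : Char → Bool} : ∀ (xs : List Char), (∀ a ∈ xs, p a = true) →
    xs.takeWhile p = xs := by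
  intro xs h
  induction xs with
  | nil => rfl
  | cons a xs ih =>
    rw [List.takeWhile_cons, if_pos (h a (List.mem_cons_self)),
      ih (fun b hb => h b (List.mem_cons_of_mem a hb))]

theorem pv_takeWhile_append_stop {p : Char → Bool} : ∀ (xs ys : List Char),
    (∃ x ∈ xs, p x = false) → (xs ++ ys).takeWhile p = xs.takeWhile p := by
  intro xs ys h
  induction xs with
  | nil => obtain ⟨x, hx, _⟩ := h; exact absurd hx (List.not_mem_nil)
  | cons a xs ih =>
    rw [List.cons_append, List.takeWhile_cons, List.takeWhile_cons]
    cases hpa : p a with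
    | false => rfl
    | true =>
      obtain ⟨x, hx, hpx⟩ := h
      rcases List.mem_cons.1 hx with rfl | hx'
      · rw [hpa] at hpx; exact absurd hpx (by simp)
      · rw [ih ⟨x, hx', hpx⟩]

theorem pv_takeWhile_append_all {p : Char → Bool} : ∀ (xs ys : List Char),
    (∀ a ∈ xs, p a = true) → (xs ++ ys).takeWhile p = xs ++ ys.takeWhile p := by
  intro xs ys h
  induction xs with
  | nil => rfl
  | cons a xs ih =>
    rw [List.cons_append, List.takeWhile_cons, if_pos (h a (List.mem_cons_self)),
      List.cons_append, ih (fun b hb => h b (List.mem_cons_of_mem a hb))]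

theorem pv_takeWhile_ext {p q : Char → Bool} (h : ∀ a, p a = q a) : ∀ (xs : List Char),
    xs.takeWhile p = xs.takeWhile q := by
  intro xs
  induction xs with
  | nil => rfl
  | cons a xs ih => rw [List.takeWhile_cons, List.takeWhile_cons, h a, ih]

theorem pvTailseg_of_not_mem {c : Char} {l : List Char} (h : c ∉ l) : pvTailseg c l = l := by
  unfold pvTailseg
  rw [pv_takeWhile_all l.reverse (fun a ha => by
        simp only [bne_iff_ne, ne_eq]
        intro heq; exact h (heq ▸ List.mem_reverse.1 ha))]
  exact List.reverse_reverse l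

theorem pvTailseg_cons_of_mem {c ch : Char} {rest : List Char} (h : c ∈ rest) :
    pvTailseg c (ch :: rest) = pvTailseg c rest := by
  unfold pvTailseg
  rw [List.reverse_cons, pv_takeWhile_append_stop _ _ ⟨c, List.mem_reverse.2 h, by simp⟩]

-- the last element of split(l, [c]).go: the maximal c-free suffix if c occurs, else cur.reverse ++ l
theorem pv_go_getLast (c : Char) : ∀ (l : List Char) (fuel : Nat) (cur : List Char)
    (acc : List (List Char)), l.length < fuel →
    (PySem.Chars.splitOn.go [c] fuel l cur acc).getLast? =
      some (if c ∈ l then pvTailseg c l else cur.reverse ++ l) := by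
  intro l
  induction l with
  | nil =>
    intro fuel cur acc hf
    match fuel, hf with
    | fuel + 1, _ =>
      rw [show PySem.Chars.splitOn.go [c] (fuel + 1) [] cur acc = (cur.reverse :: acc).reverse from rfl]
      simp [List.getLast?_reverse]
  | cons ch rest ih =>
    intro fuel cur acc hf
    match fuel, hf with
    | fuel + 1, hf =>
      have hfu : rest.length < fuel := by
        have := Nat.lt_of_succ_lt_succ (by simpa using hf)
        simpa using this
      rw [show PySem.Chars.splitOn.go [c] (fuel + 1) (ch :: rest) cur acc =
            (if [c].isPrefixOf (ch :: rest) = true then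
              PySem.Chars.splitOn.go [c] fuel (List.drop 1 (ch :: rest)) [] (cur.reverse :: acc)
            else PySem.Chars.splitOn.go [c] fuel rest (ch :: cur) acc) from rfl]
      by_cases hch : ch = c
      · subst hch
        rw [if_pos (by simp [List.isPrefixOf])]
        rw [List.drop_one, List.tail_cons]
        rw [ih fuel [] (cur.reverse :: acc) hfu]
        rw [if_pos (List.mem_cons_self)]
        by_cases hr : ch ∈ rest
        · rw [if_pos hr, pvTailseg_cons_of_mem hr]
        · rw [if_neg hr]
          unfold pvTailseg
          rw [List.reverse_cons,
            pv_takeWhile_append_all rest.reverse [ch] (fun a ha => by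
              simp only [bne_iff_ne, ne_eq]
              intro heq; exact hr (heq ▸ List.mem_reverse.1 ha))]
          simp
      · rw [if_neg (by
            simp only [List.isPrefixOf, Bool.and_eq_true, beq_iff_eq]
            intro hand
            exact hch hand.1.symm)]
        rw [ih fuel (ch :: cur) acc hfu]
        by_cases hr : c ∈ rest
        · rw [if_pos hr, if_pos (List.mem_cons_of_mem ch hr), pvTailseg_cons_of_mem hr]
        · rw [if_neg hr, if_neg (by
            simp only [List.mem_cons, not_or]
            exact ⟨fun h => hch h.symm, hr⟩)]
          simp

-- one pass of A's loop body equals taking the maximal c-free suffix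
theorem pv_stepA (c : Char) (ep : List Char) :
    (if PySem.Chars.isIn [c] ep then
        (PySem.List.pyGet? (PySem.Chars.splitOn ep [c]) (-1)).getD []
      else ep) = pvTailseg c ep := by
  by_cases hc : c ∈ ep
  · rw [if_pos ((PySem.Chars.isIn_iff_infix [c] ep).2 ((pv_singleton_infix_iff c ep).2 hc))]
    rw [PySem.List.pyGet?_neg_one]
    rw [show PySem.Chars.splitOn ep [c] =
          PySem.Chars.splitOn.go [c] (ep.length + 1) ep [] [] from rfl]
    rw [pv_go_getLast c ep (ep.length + 1) [] [] (Nat.lt_succ_self _), if_pos hc]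
    rfl
  · rw [if_neg (fun h => hc ((pv_singleton_infix_iff c ep).1 ((PySem.Chars.isIn_iff_infix [c] ep).1 h)))]
    exact (pvTailseg_of_not_mem hc).symm

-- B's backward scan, closed form
theorem pvScan_eq : ∀ (rev acc : List Char),
    pvScan rev acc = (rev.takeWhile (fun c => !pvSepSet.contains c)).reverse ++ acc := by
  intro rev
  induction rev with
  | nil => intro acc; rfl
  | cons a rest ih =>
    intro acc
    rw [pvScan, List.takeWhile_cons]
    cases hs : pvSepSet.contains a with
    | true => simp
    | false =>
      rw [if_neg (by simp), if_pos (by simp)]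
      rw [ih (a :: acc), List.reverse_cons]
      simp

-- the six chained tailseg passes collapse into B's one scan
theorem pv_chain (s : List Char) :
    pvTailseg '_' (pvTailseg '-' (pvTailseg '&' (pvTailseg '?' (pvTailseg '=' (pvTailseg '/' s))))) =
      pvScan s.reverse [] := by
  rw [pvScan_eq, List.append_nil]
  unfold pvTailseg
  simp only [List.reverse_reverse]
  rw [List.takeWhile_takeWhile, List.takeWhile_takeWhile, List.takeWhile_takeWhile,
    List.takeWhile_takeWhile, List.takeWhile_takeWhile]
  refine congrArg List.reverse (pv_takeWhile_ext (fun a => ?_) s.reverse)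
  have hset : pvSepSet = ['/', '=', '?', '&', '-', '_'] := rfl
  rw [Bool.eq_iff_iff]
  simp only [hset, decide_eq_true_eq, bne_iff_ne, ne_eq, Bool.not_eq_true',
    List.contains_eq_mem, List.mem_cons, List.not_mem_nil, or_false, decide_eq_false_iff_not,
    not_or]
  tauto

-- ===== VERDICT (by name: the statement is the Claim_ definition above) =====
set_option maxHeartbeats 1600000 in
theorem get_shortened_endpoint_py_spec : Claim_equal_get_shortened_endpoint_py := by
  unfold Claim_equal_get_shortened_endpoint_py
  intro endpoint _
  unfold Spec_get_shortened_endpoint_py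
  simp only [get_shortened_endpoint_py, get_shortened_endpoint_py_alt]
  simp only [pvSeparators, List.foldl_cons, List.foldl_nil]
  rw [pv_stepA '/', pv_stepA '=', pv_stepA '?', pv_stepA '&', pv_stepA '-', pv_stepA '_']
  rw [pv_chain endpoint.toList]
  generalize pvScan endpoint.toList.reverse [] = T
  simp only [PySem.Chars.len_eq, PySem.Chars.slice_eq_listSlice]
  by_cases hlen : T.length > 15
  · rw [if_pos (by exact_mod_cast hlen), if_pos hlen]
    rw [PySem.List.slice_to T (by norm_num)]
    rw [show ((12 : Int)).toNat = 12 from rfl]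
  · rw [if_neg (fun h => hlen (by exact_mod_cast h)), if_neg hlen]
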